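-- pv_equiv track=rewrite | github.com/iamrishap/PythonBits | InterviewBits/hashing/equal.py | equal
-- ===== SOURCE A (Python) =====
-- def equal(A):
--
--     """ Return matching indices or None """
--     n = len(A)
--     sums = {}
--     res = []
--     # Iterate pairs in lexicographical order
--     for i in range(n - 1):
--         for j in range(i + 1, n):
--             s = A[i] + A[j]
--             if s in sums:
--                 k, l = sums[s]
--                 if i != k and i != l and j != l:
--                     # Here k < i necessarilly
--                     if res:
--                         res = min(res, [k, l, i, j])
--                     else:
--                         res = [k, l, i, j]
--             else:
--                 sums[s] = (i, j)  # smallest pair for this sum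
--     return res
-- ===== SOURCE B (Python) =====
-- def equal(A):
--     """Two-pass version: index every pair-sum by its first (lexicographically
--     smallest) pair, then scan all pairs against that index keeping the running
--     minimum quadruple."""
--     n = len(A)
--     first = {}
--     for i in range(n - 1):
--         for j in range(i + 1, n):
--             s = A[i] + A[j]
--             if s not in first:
--                 first[s] = (i, j)
--     best = []
--     for i in range(n - 1):
--         for j in range(i + 1, n):
--             k, l = first[A[i] + A[j]]
--             # first[s] == (i, j) is excluded by i != k
--             if i != k and i != l and j != l:
--                 cand = [k, l, i, j]
--                 if not best or cand < best:
--                     best = cand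
--     return best
-- ===== Notes on version B (the rewrite author's own statement) =====
-- stated objective: alternative
-- what changed: A interleaves building the sum->first-pair dict with the minimisation in one pass (insert-or-compare per pair); B first builds the complete first-pair index over all pairs, then a separate second pass looks every pair up in that finished index and keeps the running minimum quadruple.
import Mathlib
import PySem

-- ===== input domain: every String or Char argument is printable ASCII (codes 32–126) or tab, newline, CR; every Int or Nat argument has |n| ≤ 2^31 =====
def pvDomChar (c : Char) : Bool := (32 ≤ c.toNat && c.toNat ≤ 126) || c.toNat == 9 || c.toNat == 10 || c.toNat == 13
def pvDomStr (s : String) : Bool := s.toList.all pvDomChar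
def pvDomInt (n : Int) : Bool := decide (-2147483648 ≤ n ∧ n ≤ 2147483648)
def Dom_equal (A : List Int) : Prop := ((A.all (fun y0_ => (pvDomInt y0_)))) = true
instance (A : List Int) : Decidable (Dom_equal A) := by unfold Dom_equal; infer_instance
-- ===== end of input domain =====

-- B replaces A's single interleaved pass (dict filled while minimising) by two passes:
-- first index every pair-sum by its first pair, then scan all pairs against that index.
-- Same return value everywhere; objective: alternative decomposition.

-- ===== PORT A =====
-- Python's `<` on two int lists (lexicographic); used by min(res, cand) and cand < best.
def lexLt : List Int → List Int → Bool
  | _, [] => false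
  | [], _ :: _ => true
  | a :: as, b :: bs => if a < b then true else if b < a then false else lexLt as bs

-- min(r, c): returns r unless c is strictly smaller (Python min keeps the first arg on ties)
def pyMinL (r c : List Int) : List Int := if lexLt c r then c else r

-- body of A's inner loop: state = (sums, res)
def stepA (A : List Int) (st : PySem.Dict Int (Int × Int) × List Int) (i j : Int) :
    PySem.Dict Int (Int × Int) × List Int :=
  let s := PySem.List.pyGetD A i 0 + PySem.List.pyGetD A j 0
  match st.1.get? s with
  | some (k, l) =>
      if i ≠ k ∧ i ≠ l ∧ j ≠ l then
        (st.1, if st.2 ≠ [] then pyMinL st.2 [k, l, i, j] else [k, l, i, j])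
      else st
  | none => (st.1.insert s (i, j), st.2)

def equal (A : List Int) : List Int :=
  let n : Int := A.length
  ((PySem.List.pyRange 0 (n - 1) 1).foldl (fun st i =>
      (PySem.List.pyRange (i + 1) n 1).foldl (fun st j => stepA A st i j) st)
    (PySem.Dict.empty, [])).2

-- ===== PORT B =====
-- body of B's first loop: record the first pair seen for each sum
def insStep (A : List Int) (d : PySem.Dict Int (Int × Int)) (i j : Int) :
    PySem.Dict Int (Int × Int) :=
  let s := PySem.List.pyGetD A i 0 + PySem.List.pyGetD A j 0
  if d.contains s then d else d.insert s (i, j)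

-- body of B's second loop: compare (i, j) against the first pair with the same sum
-- (the lookup cannot miss after the first pass, so the getD default is never read)
def bestStep (A : List Int) (first : PySem.Dict Int (Int × Int)) (best : List Int) (i j : Int) :
    List Int :=
  let kl := first.getD (PySem.List.pyGetD A i 0 + PySem.List.pyGetD A j 0) (0, 0)
  if i ≠ kl.1 ∧ i ≠ kl.2 ∧ j ≠ kl.2 then
    if best = [] ∨ lexLt [kl.1, kl.2, i, j] best then [kl.1, kl.2, i, j] else best
  else best

def equal_alt (A : List Int) : List Int :=
  let n : Int := A.length
  let first := (PySem.List.pyRange 0 (n - 1) 1).foldl (fun d i =>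
      (PySem.List.pyRange (i + 1) n 1).foldl (fun d j => insStep A d i j) d)
    PySem.Dict.empty
  (PySem.List.pyRange 0 (n - 1) 1).foldl (fun b i =>
      (PySem.List.pyRange (i + 1) n 1).foldl (fun b j => bestStep A first b i j) b)
    []

-- ===== PRECONDITION & SPEC =====
def Spec_equal (A : List Int) (out : List Int) : Prop := out = equal_alt A
instance (A : List Int) (out : List Int) : Decidable (Spec_equal A out) := by unfold Spec_equal; infer_instance

-- ===== CLAIM (what is proved, stated in full; the proofs are below) =====
def Claim_equal_equal : Prop := ∀ (A : List Int), Dom_equal A → Spec_equal A (equal A)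

-- ===== LEMMAS AND PROOFS =====

-- all pairs (i, j) with 0 ≤ i < j < n, in the iteration order of both programs
def pairs (n : Int) : List (Int × Int) :=
  (PySem.List.pyRange 0 (n - 1) 1).flatMap
    (fun i => (PySem.List.pyRange (i + 1) n 1).map (fun j => (i, j)))

-- the dict built by B's first pass over a given list of pairs
def fwd (A : List Int) (ps : List (Int × Int)) : PySem.Dict Int (Int × Int) :=
  ps.foldl (fun d p => insStep A d p.1 p.2) PySem.Dict.empty

lemma foldl_nested_pairs {σ : Type} (l : List Int) (g : Int → List Int)
    (f : σ → Int → Int → σ) (init : σ) :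
    l.foldl (fun st i => (g i).foldl (fun st j => f st i j) st) init
    = (l.flatMap (fun i => (g i).map (fun j => (i, j)))).foldl (fun st p => f st p.1 p.2) init := by
  induction l generalizing init with
  | nil => rfl
  | cons x xs ih =>
      simp only [List.foldl_cons, List.flatMap_cons, List.foldl_append, List.foldl_map, ih]

lemma nested_eq {σ : Type} (n : Int) (f : σ → Int → Int → σ) (init : σ) :
    (PySem.List.pyRange 0 (n - 1) 1).foldl (fun st i =>
        (PySem.List.pyRange (i + 1) n 1).foldl (fun st j => f st i j) st) init
    = (pairs n).foldl (fun st p => f st p.1 p.2) init := by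
  unfold pairs
  exact foldl_nested_pairs _ _ f init

lemma fwd_append_singleton (A : List Int) (ps : List (Int × Int)) (p : Int × Int) :
    fwd A (ps ++ [p]) = insStep A (fwd A ps) p.1 p.2 := by
  simp [fwd, List.foldl_append]

-- an entry of the first-pass dict survives processing further pairs
lemma fwd_persist (A : List Int) (ps qs : List (Int × Int)) (s : Int) (v : Int × Int)
    (h : (fwd A ps).get? s = some v) : (fwd A (ps ++ qs)).get? s = some v := by
  induction qs generalizing ps with
  | nil => simpa using h
  | cons q qs ih =>
      have hsplit : ps ++ q :: qs = (ps ++ [q]) ++ qs := by simp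
      rw [hsplit]
      apply ih
      rw [fwd_append_singleton]
      unfold insStep
      by_cases hc : (fwd A ps).contains (PySem.List.pyGetD A q.1 0 + PySem.List.pyGetD A q.2 0)
      · simpa [hc] using h
      · rw [if_neg hc]
        rcases eq_or_ne s (PySem.List.pyGetD A q.1 0 + PySem.List.pyGetD A q.2 0) with rfl | hne
        · rw [PySem.Dict.contains_eq_isSome_get?, h] at hc; simp at hc
        · rw [PySem.Dict.get?_insert_of_ne _ _ hne]; exact h

-- a sum absent so far is keyed to the very next pair carrying it
lemma fwd_fresh (A : List Int) (ps qs : List (Int × Int)) (p : Int × Int)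
    (h : (fwd A ps).get? (PySem.List.pyGetD A p.1 0 + PySem.List.pyGetD A p.2 0) = none) :
    (fwd A (ps ++ p :: qs)).get? (PySem.List.pyGetD A p.1 0 + PySem.List.pyGetD A p.2 0)
      = some p := by
  have hsplit : ps ++ p :: qs = (ps ++ [p]) ++ qs := by simp
  rw [hsplit]
  apply fwd_persist
  rw [fwd_append_singleton]
  unfold insStep
  have hc : (fwd A ps).contains (PySem.List.pyGetD A p.1 0 + PySem.List.pyGetD A p.2 0) = false := by
    rw [PySem.Dict.contains_eq_isSome_get?, h]; rfl
  rw [if_neg (by simp [hc])]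
  exact PySem.Dict.get?_insert_self _ _ _

-- A's res update and B's best update agree
lemma res_update (r c : List Int) :
    (if r ≠ [] then pyMinL r c else c) = (if r = [] ∨ lexLt c r = true then c else r) := by
  unfold pyMinL
  by_cases hr : r = []
  · simp [hr]
  · by_cases hl : lexLt c r = true <;> simp [hr, hl]

-- the heart: running A's loop from the dict of the processed prefix produces the same
-- res as B's second pass (over the same remaining pairs) with the completed dict
lemma loop_eq (A : List Int) (full done todo : List (Int × Int))
    (h : done ++ todo = full) (r : List Int) :
    (todo.foldl (fun st p => stepA A st p.1 p.2) (fwd A done, r)).2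
    = todo.foldl (fun b p => bestStep A (fwd A full) b p.1 p.2) r := by
  induction todo generalizing done r with
  | nil => rfl
  | cons p rest ih =>
      have hsplit : (done ++ [p]) ++ rest = full := by simpa using h
      simp only [List.foldl_cons]
      cases h1 : (fwd A done).get? (PySem.List.pyGetD A p.1 0 + PySem.List.pyGetD A p.2 0) with
      | some kl =>
          obtain ⟨k, l⟩ := kl
          have hfull : (fwd A full).get? (PySem.List.pyGetD A p.1 0 + PySem.List.pyGetD A p.2 0)
              = some (k, l) := by rw [← h]; exact fwd_persist A done _ _ _ h1
          have hfwd : fwd A (done ++ [p]) = fwd A done := by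
            rw [fwd_append_singleton]
            unfold insStep
            simp [PySem.Dict.contains_eq_isSome_get?, h1]
          have hstep : stepA A (fwd A done, r) p.1 p.2
              = (fwd A done,
                 if p.1 ≠ k ∧ p.1 ≠ l ∧ p.2 ≠ l then
                   (if r ≠ [] then pyMinL r [k, l, p.1, p.2] else [k, l, p.1, p.2])
                 else r) := by
            simp only [stepA, h1]
            split_ifs <;> rfl
          have hbest : bestStep A (fwd A full) r p.1 p.2
              = if p.1 ≠ k ∧ p.1 ≠ l ∧ p.2 ≠ l then
                  (if r = [] ∨ lexLt [k, l, p.1, p.2] r = true then [k, l, p.1, p.2] else r)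
                else r := by
            simp only [bestStep, PySem.Dict.getD_eq_get?_getD, hfull, Option.getD_some]
          rw [hstep, hbest, ← hfwd, res_update]
          exact ih (done ++ [p]) hsplit _
      | none =>
          have hfull : (fwd A full).get? (PySem.List.pyGetD A p.1 0 + PySem.List.pyGetD A p.2 0)
              = some p := by rw [← h]; exact fwd_fresh A done rest p h1
          have hstep : stepA A (fwd A done, r) p.1 p.2
              = ((fwd A done).insert (PySem.List.pyGetD A p.1 0 + PySem.List.pyGetD A p.2 0) (p.1, p.2), r) := by
            simp only [stepA, h1]
          have hfwd : fwd A (done ++ [p])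
              = (fwd A done).insert (PySem.List.pyGetD A p.1 0 + PySem.List.pyGetD A p.2 0) (p.1, p.2) := by
            rw [fwd_append_singleton]
            unfold insStep
            have hc : (fwd A done).contains (PySem.List.pyGetD A p.1 0 + PySem.List.pyGetD A p.2 0) = false := by
              rw [PySem.Dict.contains_eq_isSome_get?, h1]; rfl
            simp [hc]
          have hbest : bestStep A (fwd A full) r p.1 p.2 = r := by
            simp only [bestStep, PySem.Dict.getD_eq_get?_getD, hfull, Option.getD_some]
            simp
          rw [hstep, hbest, ← hfwd]
          exact ih (done ++ [p]) hsplit _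

-- ===== VERDICT (by name: the statement is the Claim_ definition above) =====
theorem equal_spec : Claim_equal_equal := by
  intro A _
  unfold Spec_equal
  simp only [equal, equal_alt]
  rw [nested_eq (A.length : Int) (fun st i j => stepA A st i j) ((PySem.Dict.empty : PySem.Dict Int (Int × Int)), ([] : List Int))]
  rw [nested_eq (A.length : Int) (fun d i j => insStep A d i j) (PySem.Dict.empty : PySem.Dict Int (Int × Int))]
  have hfwd : (pairs (A.length : Int)).foldl (fun d p => insStep A d p.1 p.2) PySem.Dict.empty
      = fwd A (pairs (A.length : Int)) := rfl
  rw [hfwd]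
  rw [nested_eq (A.length : Int) (fun b i j => bestStep A (fwd A (pairs (A.length : Int))) b i j) ([] : List Int)]
  exact loop_eq A (pairs (A.length : Int)) [] (pairs (A.length : Int)) (by simp) []
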